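-- pv_equiv track=rewrite | github.com/Berliner187/orientation | main.py | find_scores_not_accounting
-- ===== SOURCE A (Python) =====
-- def find_scores_not_accounting(a, scores, count):
--     scores_not_sort = scores.copy()
--     scores.sort()
--     find_indexes = []
--     for i in range(0,len(scores)-count):
--         index = scores_not_sort.index(scores[i])
--         find_indexes.append(index)
--         scores_not_sort[index] = ''
--         scores[i] = ''
--     find_indexes.sort()
--     return find_indexes
-- ===== SOURCE B (Python) =====
-- def find_scores_not_accounting(a, scores, count):
--     # Return-value equivalent to A; does not mutate `scores` in place as A does.
--     n = len(scores)
--     k = max(n - count, 0)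
--     order = sorted(range(n), key=lambda i: scores[i])
--     return sorted(order[:k])
-- ===== Notes on version B (the rewrite author's own statement) =====
-- stated objective: faster
-- what changed: Replaces the per-element linear .index scan over the mutated copy (quadratic) by one stable sort of the indices keyed by their score, taking the first len-count indices and sorting them.
import Mathlib
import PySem

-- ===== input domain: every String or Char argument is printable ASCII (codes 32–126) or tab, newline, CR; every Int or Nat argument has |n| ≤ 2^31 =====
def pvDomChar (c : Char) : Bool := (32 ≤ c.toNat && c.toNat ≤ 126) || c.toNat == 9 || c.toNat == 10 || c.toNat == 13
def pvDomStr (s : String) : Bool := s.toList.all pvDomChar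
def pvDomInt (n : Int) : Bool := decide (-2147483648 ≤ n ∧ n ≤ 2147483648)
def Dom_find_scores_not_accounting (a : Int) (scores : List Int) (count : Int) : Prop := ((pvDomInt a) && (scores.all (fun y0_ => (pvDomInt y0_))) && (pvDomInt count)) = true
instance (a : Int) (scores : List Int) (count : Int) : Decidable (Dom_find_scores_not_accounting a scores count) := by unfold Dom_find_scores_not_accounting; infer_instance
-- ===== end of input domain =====

-- B replaces A's quadratic blank-and-rescan (.index on a mutated copy) by one stable sort of the
-- indices keyed by score; equivalence is about the RETURN value only (A sorts/blanks `scores` in place, B does not mutate).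

-- ===== PORT A =====
-- loop body: v = scores[i]; index = scores_not_sort.index(v); blank both; append index.
-- Blanked cells ('' in Python) are modelled as `none`; live cells as `some score`.
def pvLoopA : List Int → List (Option Int) → List (Option Int) → List Int →
    List (Option Int) × List (Option Int) × List Int
  | [], srt, sns, acc => (srt, sns, acc)
  | i :: rest, srt, sns, acc =>
    match PySem.List.pyGet? srt i with
    | none => pvLoopA rest srt sns acc          -- IndexError (excluded by Pre_)
    | some v =>
      match PySem.List.index? sns v with
      | none => pvLoopA rest srt sns acc        -- ValueError (unreachable under Pre_)
      | some j =>
        pvLoopA rest (PySem.List.pySetD srt (i : Int) none) (sns.set j none) (acc ++ [(j : Int)])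

def find_scores_not_accounting (a : Int) (scores : List Int) (count : Int) : List Int :=
  let scores_not_sort : List (Option Int) := scores.map some
  let srt : List (Option Int) := (PySem.List.sorted scores (fun x => x) false).map some
  let st := pvLoopA (PySem.List.pyRange 0 ((scores.length : Int) - count) 1) srt scores_not_sort []
  PySem.List.sorted st.2.2 (fun x => x) false

-- ===== PORT B =====
def find_scores_not_accounting_alt (a : Int) (scores : List Int) (count : Int) : List Int :=
  let n : Int := (scores.length : Int)
  let k : Int := max (n - count) 0
  let order := PySem.List.sorted (PySem.List.pyRange 0 n 1)
      (fun i => PySem.List.pyGetD scores i 0) false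
  PySem.List.sorted (PySem.List.slice order none (some k)) (fun x => x) false

-- ===== PRECONDITION & SPEC =====
-- A raises IndexError exactly when count < 0 (the loop bound len(scores)-count then exceeds the list).
def Pre_find_scores_not_accounting (a : Int) (scores : List Int) (count : Int) : Prop := 0 ≤ count
instance (a : Int) (scores : List Int) (count : Int) : Decidable (Pre_find_scores_not_accounting a scores count) := by unfold Pre_find_scores_not_accounting; infer_instance

def pvWitness_find_scores_not_accounting : Int × List Int × Int := (0, [3, 1, 2, 1], 2)

def Spec_find_scores_not_accounting (a : Int) (scores : List Int) (count : Int) (out : List Int) : Prop := out = find_scores_not_accounting_alt a scores count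
instance (a : Int) (scores : List Int) (count : Int) (out : List Int) : Decidable (Spec_find_scores_not_accounting a scores count out) := by unfold Spec_find_scores_not_accounting; infer_instance

-- ===== CLAIM (what is proved, stated in full; the proofs are below) =====
def Claim_equal_find_scores_not_accounting : Prop := ∀ (a : Int) (scores : List Int) (count : Int), Dom_find_scores_not_accounting a scores count → Pre_find_scores_not_accounting a scores count → Spec_find_scores_not_accounting a scores count (find_scores_not_accounting a scores count)

-- ===== LEMMAS AND PROOFS =====

-- the lexicographic (key, index) strict order that the stable sort realises
def pvLex (k : Int → Int) (i j : Int) : Prop := k i < k j ∨ (k i = k j ∧ i < j)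

lemma pvInsert_pairwise (k : Int → Int) (x : Int) (acc : List Int)
    (hp : acc.Pairwise (pvLex k)) (hlt : ∀ y ∈ acc, y < x) :
    (PySem.List.insertBy (fun a b => decide (k a < k b)) x acc).Pairwise (pvLex k) := by
  induction acc with
  | nil => simp [PySem.List.insertBy]
  | cons y ys ih =>
    by_cases hxy : k x < k y
    · have : PySem.List.insertBy (fun a b => decide (k a < k b)) x (y :: ys) = x :: y :: ys := by
        simp [PySem.List.insertBy, hxy]
      rw [this]
      refine List.Pairwise.cons ?_ hp
      intro z hz
      rcases List.mem_cons.mp hz with rfl | hz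
      · exact Or.inl hxy
      · rcases List.pairwise_cons.mp hp with ⟨hy, _⟩
        rcases hy z hz with h | ⟨h, _⟩ <;> exact Or.inl (by omega)
    · have : PySem.List.insertBy (fun a b => decide (k a < k b)) x (y :: ys) =
        y :: PySem.List.insertBy (fun a b => decide (k a < k b)) x ys := by
        simp [PySem.List.insertBy, hxy]
      rw [this]
      rcases List.pairwise_cons.mp hp with ⟨hy, hys⟩
      refine List.Pairwise.cons ?_ (ih hys (fun z hz => hlt z (List.mem_cons_of_mem _ hz)))
      intro z hz
      rcases (PySem.List.mem_insertBy _ _ _ _).mp hz with rfl | hz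
      · rcases lt_or_eq_of_le (not_lt.mp hxy) with h | h
        · exact Or.inl h
        · exact Or.inr ⟨h, hlt y (by simp)⟩
      · exact hy z hz

lemma pvFoldl_pairwise (k : Int → Int) : ∀ (xs acc : List Int), xs.Pairwise (· < ·) →
    acc.Pairwise (pvLex k) → (∀ y ∈ acc, ∀ x ∈ xs, y < x) →
    (xs.foldl (fun acc x => PySem.List.insertBy (fun a b => decide (k a < k b)) x acc) acc).Pairwise (pvLex k)
  | [], acc, _, hp, _ => by simpa using hp
  | x :: xs, acc, h, hp, hlt => by
    rcases List.pairwise_cons.mp h with ⟨hx, hxs⟩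
    simp only [List.foldl_cons]
    refine pvFoldl_pairwise k xs _ hxs
      (pvInsert_pairwise k x acc hp (fun y hy => hlt y hy x (by simp))) ?_
    intro y hy z hz
    rcases (PySem.List.mem_insertBy _ _ _ _).mp hy with rfl | hy
    · exact hx z hz
    · exact hlt y hy z (List.mem_cons_of_mem _ hz)

lemma pvSorted_pairwise_lex (k : Int → Int) (xs : List Int) (h : xs.Pairwise (· < ·)) :
    (PySem.List.sorted xs k false).Pairwise (pvLex k) := by
  rw [PySem.List.sorted_eq_foldl_insertBy]
  exact pvFoldl_pairwise k xs [] h (by simp) (by simp)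

lemma pvIndex?_eq_some {α : Type} [BEq α] [LawfulBEq α] (xs : List α) (v : α) (kk : Nat)
    (hk : kk < xs.length) (hv : xs[kk] = v) (hprev : ∀ j (hj : j < kk), xs[j]'(by omega) ≠ v) :
    PySem.List.index? xs v = some kk := by
  rw [PySem.List.index?_eq_some_iff]
  refine ⟨xs.take kk, xs.drop (kk+1), ?_, by simp [hk.le], ?_⟩
  · conv_lhs => rw [← List.take_append_drop kk xs, List.drop_eq_getElem_cons hk, hv]
  · intro hmem
    rcases List.mem_take_iff_getElem.mp hmem with ⟨j, hj, hje⟩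
    exact hprev j (by omega) (by simpa [Nat.lt_min.mp hj] using hje)

lemma pvLoopA_inv (k : Int → Int) (ord : List Int) (n : Nat) (m : Int)
    (hlen : ord.length = n)
    (hpair : ord.Pairwise (pvLex k))
    (hmem : ∀ i, i ∈ ord ↔ 0 ≤ i ∧ i < (n : Int))
    (hnd : ord.Nodup)
    (hmn : m ≤ (n : Int)) :
    ∀ (d t : Nat), t ≤ m.toNat → m.toNat - t = d →
    (pvLoopA (PySem.List.pyRange (t : Int) m 1)
      (List.replicate t (none : Option Int) ++ (ord.drop t).map (fun i => some (k i)))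
      ((List.range n).map (fun (j : Nat) => if ((j : Int)) ∈ ord.take t then none else some (k (j : Int))))
      (ord.take t)).2.2 = ord.take m.toNat := by
  intro d
  induction d with
  | zero =>
    intro t ht hd
    have htm : t = m.toNat := by omega
    rw [PySem.List.pyRange_one_eq_nil (by omega)]
    simp [pvLoopA, htm]
  | succ d ih =>
    intro t ht hd
    have htm : t < m.toNat := by omega
    have htn : t < n := by omega
    have htn' : t < ord.length := by omega
    set O := ord[t]'htn' with hO
    have hOmem : O ∈ ord := List.getElem_mem htn'
    have hOr : 0 ≤ O ∧ O < (n : Int) := (hmem O).mp hOmem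
    have hJn : O.toNat < n := by omega
    have hJO : (O.toNat : Int) = O := by omega
    have hsplit : ord = ord.take t ++ ord.drop t := (List.take_append_drop t ord).symm
    have hdropc : ord.drop t = O :: ord.drop (t + 1) := List.drop_eq_getElem_cons htn'
    have hOdrop : O ∈ ord.drop t := by rw [hdropc]; exact List.mem_cons_self
    have hOnottake : O ∉ ord.take t := by
      have hnd' : (ord.take t ++ ord.drop t).Nodup := by rw [← hsplit]; exact hnd
      have hdis := (List.nodup_append.mp hnd').2.2
      intro hmemT
      exact hdis O hmemT O hOdrop rfl
    have htake1 : ord.take (t + 1) = ord.take t ++ [O] := by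
      rw [List.take_add_one, List.getElem?_eq_getElem htn']; rfl
    -- one loop step
    rw [PySem.List.pyRange_one_cons (by omega)]
    have hget : PySem.List.pyGet? (List.replicate t (none : Option Int) ++ (ord.drop t).map (fun i => some (k i))) (t : Int)
        = some (some (k O)) := by
      rw [PySem.List.pyGet?_natCast, List.getElem?_append_right (by simp)]
      simp [hdropc]
    have hidx : PySem.List.index? ((List.range n).map (fun (j : Nat) => if ((j : Int)) ∈ ord.take t then none else some (k (j : Int)))) (some (k O)) = some O.toNat := by
      apply pvIndex?_eq_some _ _ O.toNat (by simpa using hJn)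
      · simp only [List.getElem_map, List.getElem_range]
        rw [hJO, if_neg hOnottake]
      · intro j hj heq
        simp only [List.getElem_map, List.getElem_range] at heq
        by_cases hjt : ((j : Int)) ∈ ord.take t
        · rw [if_pos hjt] at heq
          exact absurd heq (by simp)
        · rw [if_neg hjt] at heq
          have hkj : k (j : Int) = k O := Option.some.inj heq
          have hjmem : (j : Int) ∈ ord := (hmem _).mpr ⟨by omega, by omega⟩
          have hjdrop : (j : Int) ∈ ord.drop t := by
            rcases List.mem_append.mp (hsplit ▸ hjmem) with h | h
            · exact absurd h hjt
            · exact h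
          have hjO : (j : Int) ≠ O := by omega
          have hjdrop1 : (j : Int) ∈ ord.drop (t + 1) := by
            rcases List.mem_cons.mp (hdropc ▸ hjdrop) with h | h
            · exact absurd h hjO
            · exact h
          have hpd : (ord.drop t).Pairwise (pvLex k) := hpair.drop
          rw [hdropc] at hpd
          have hlx := (List.pairwise_cons.mp hpd).1 _ hjdrop1
          rcases hlx with h | ⟨h, h2⟩ <;>
            · rw [hkj] at *; omega
    simp only [pvLoopA, hget, hidx]
    -- rewrite the three state components to the (t+1) forms
    have eqSrt : PySem.List.pySetD (List.replicate t (none : Option Int) ++ (ord.drop t).map (fun i => some (k i))) (t : Int) none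
        = List.replicate (t + 1) (none : Option Int) ++ (ord.drop (t + 1)).map (fun i => some (k i)) := by
      rw [PySem.List.pySetD_natCast, hdropc, List.map_cons,
        List.set_append_right _ _ (by simp)]
      simp [List.replicate_succ']
    have eqSns : ((List.range n).map (fun (j : Nat) => if ((j : Int)) ∈ ord.take t then none else some (k (j : Int)))).set O.toNat none
        = (List.range n).map (fun (j : Nat) => if ((j : Int)) ∈ ord.take (t + 1) then none else some (k (j : Int))) := by
      apply List.ext_getElem (by simp)
      intro i hi1 hi2
      simp only [List.getElem_set, List.getElem_map, List.getElem_range, htake1,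
        List.mem_append, List.mem_singleton]
      by_cases hiO : O.toNat = i
      · subst hiO
        simp [hJO]
      · have hne : ¬ ((i : Int) = O) := fun h => hiO (by omega)
        simp [hiO, hne]
    have eqAcc : ord.take t ++ [O] = ord.take (t + 1) := htake1.symm
    rw [eqSrt, eqSns, hJO, eqAcc]
    have hcast : ((t : Int) + 1) = ((t + 1 : Nat) : Int) := by push_cast; ring
    rw [hcast]
    exact ih (t + 1) (by omega) (by omega)


theorem find_scores_not_accounting_spec : Claim_equal_find_scores_not_accounting := by
  intro a scores count _ hpre
  unfold Pre_find_scores_not_accounting at hpre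
  unfold Spec_find_scores_not_accounting
  simp only [find_scores_not_accounting, find_scores_not_accounting_alt]
  set n := scores.length with hn
  set k : Int → Int := fun i => PySem.List.pyGetD scores i 0 with hkdef
  set ord := PySem.List.sorted (PySem.List.pyRange 0 (n : Int) 1) k false with horddef
  have hperm := PySem.List.sorted_perm (PySem.List.pyRange 0 (n : Int) 1) k false
  have hlen : ord.length = n := by
    rw [horddef, PySem.List.length_sorted, PySem.List.length_pyRange_one]; omega
  have hpair : ord.Pairwise (pvLex k) :=
    pvSorted_pairwise_lex k _ (PySem.List.pairwise_lt_pyRange_one 0 (n : Int))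
  have hmem : ∀ i, i ∈ ord ↔ 0 ≤ i ∧ i < (n : Int) := by
    intro i; rw [horddef, PySem.List.mem_sorted, PySem.List.mem_pyRange_one]
  have hnd : ord.Nodup := (hperm.nodup_iff).mpr (PySem.List.nodup_pyRange_one 0 (n : Int))
  by_cases hm0 : 0 ≤ (n : Int) - count
  · -- the loop runs; its accumulator ends as ord.take (n - count)
    have hinv := pvLoopA_inv k ord n ((n : Int) - count) hlen hpair hmem hnd (by omega)
      ((n : Int) - count).toNat 0 (by omega) rfl
    simp only [Nat.cast_zero, List.replicate_zero, List.nil_append, List.drop_zero,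
      List.take_zero, List.not_mem_nil, if_false] at hinv
    have hmapk : (PySem.List.pyRange 0 (n : Int) 1).map k = scores := by
      rw [hkdef, hn]; exact PySem.List.map_pyGetD_pyRange_zero' scores 0
    have hsorted_id : PySem.List.sorted scores (fun x => x) false = ord.map k := by
      apply PySem.List.sorted_id_eq_of_perm_of_pairwise
      · exact (hperm.map k).trans (hmapk ▸ List.Perm.refl _)
      · exact hpair.map k (fun p q h => by rcases h with h | ⟨h, _⟩ <;> omega)
    have hsrt0 : (PySem.List.sorted scores (fun x => x) false).map some
        = ord.map (fun i => some (k i)) := by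
      rw [hsorted_id, List.map_map]; rfl
    have hsns0 : scores.map some = (List.range n).map (fun (j : Nat) => some (k (j : Int))) := by
      apply List.ext_getElem (by simp [hn])
      intro i hi1 hi2
      have hi : i < scores.length := by simpa using hi1
      simp only [List.getElem_map, List.getElem_range, hkdef, PySem.List.pyGetD_natCast,
        Option.some.injEq]
      rw [List.getD_eq_getElem _ _ hi]
    rw [hsrt0, hsns0, hinv, max_eq_left hm0, PySem.List.slice_to _ hm0]
  · -- n - count < 0 : the loop body never runs and B takes the empty prefix
    rw [PySem.List.pyRange_one_eq_nil (by omega)]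
    have hmax : max ((n : Int) - count) 0 = 0 := by omega
    rw [hmax, PySem.List.slice_to _ le_rfl]
    simp [pvLoopA]
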